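-- pv_equiv track=rewrite | github.com/NebulousOinkler/graphlopedia | Graphlopedia_2017-12-05-193532/Bode_graphtex.py | mathMode
-- ===== SOURCE A (Python) =====
-- def mathMode(value):
--   #split strings by $ to print in math mode or verbatim
--   tempo = value.split('$')
--   for index in range(len(tempo)):
--     if index%2 == 0:
--       tempo[index] = tempo[index]
--     else:
--       tempo[index] = '$' + tempo[index] + '$'
--   return(''.join(tempo))
-- ===== SOURCE B (Python) =====
-- def mathMode(value):
--   # closed form: A re-inserts every '$' and appends one trailing '$' iff the count is odd
--   return value + '$' if value.count('$') % 2 else value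
-- ===== Notes on version B (the rewrite author's own statement) =====
-- stated objective: simpler
-- what changed: Replaces the split-by-'$' / wrap-odd-segments / join pass with a closed form: the rebuilt string is always the original, plus one trailing '$' exactly when the number of '$' characters is odd.
import Mathlib
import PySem

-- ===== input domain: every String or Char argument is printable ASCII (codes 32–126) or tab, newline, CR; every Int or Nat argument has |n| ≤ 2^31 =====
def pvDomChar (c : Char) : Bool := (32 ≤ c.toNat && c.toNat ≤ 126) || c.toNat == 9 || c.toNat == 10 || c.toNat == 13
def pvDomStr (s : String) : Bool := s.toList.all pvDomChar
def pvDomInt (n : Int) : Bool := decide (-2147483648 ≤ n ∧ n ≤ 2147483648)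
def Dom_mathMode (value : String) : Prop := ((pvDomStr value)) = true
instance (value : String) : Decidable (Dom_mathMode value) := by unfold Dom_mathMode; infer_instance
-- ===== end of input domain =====

-- B replaces A's split-by-'$' / wrap-odd-segments / join pass with a closed form:
-- return the string unchanged, plus one trailing '$' exactly when the '$'-count is odd (objective: simpler).

-- ===== PORT A =====
-- value.split('$') and ''.join(...) are ported via PySem.Chars.splitOn / PySem.Chars.join (PySem's exact forms of
-- str.split / str.join for the nonempty literal separator, working on toList); the loop
-- 'for index in range(len(tempo)): tempo[index] = …' rewrites each element from its index, so it is ported as a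
-- map over PySem.List.enumerate with the same index test and the same branch bodies.
def mathMode (value : String) : String :=
  let tempo := PySem.Chars.splitOn value.toList ['$']
  let tempo2 := (PySem.List.enumerate tempo 0).map
    (fun p => if PySem.Int.mod p.1 2 == 0 then p.2 else ['$'] ++ p.2 ++ ['$'])
  String.ofList (PySem.Chars.join [] tempo2)

-- ===== PORT B =====
def mathMode_alt (value : String) : String :=
  if PySem.Str.count value "$" % 2 == 1 then value ++ "$" else value

-- ===== PRECONDITION & SPEC =====
def Spec_mathMode (value : String) (out : String) : Prop := out = mathMode_alt value
instance (value : String) (out : String) : Decidable (Spec_mathMode value out) := by unfold Spec_mathMode; infer_instance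

-- ===== CLAIM (what is proved, stated in full; the proofs are below) =====
def Claim_equal_mathMode : Prop := ∀ (value : String), Dom_mathMode value → Spec_mathMode value (mathMode value)

-- ===== LEMMAS AND PROOFS =====

-- simple structural model of value.split('$')
def spD : List Char → List (List Char)
  | [] => [[]]
  | c :: rest =>
    if c = '$' then [] :: spD rest
    else
      match spD rest with
      | [] => [[c]]
      | p :: ps => (c :: p) :: ps

-- prepend x onto the head piece (what splitOn.go's accumulated current chunk contributes)
def consH (x : List Char) : List (List Char) → List (List Char)
  | [] => [x]
  | p :: ps => (x ++ p) :: ps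

theorem spD_ne_nil (cs : List Char) : spD cs ≠ [] := by
  cases cs with
  | nil => simp [spD]
  | cons c rest =>
    simp only [spD]
    split
    · simp
    · split <;> simp

theorem go_eq_spD (fuel : Nat) :
    ∀ (l cur : List Char) (accs : List (List Char)), l.length < fuel →
      PySem.Chars.splitOn.go ['$'] fuel l cur accs = accs.reverse ++ consH cur.reverse (spD l) := by
  induction fuel with
  | zero => intro l cur accs h; exact absurd h (Nat.not_lt_zero _)
  | succ n ih =>
    intro l cur accs h
    cases l with
    | nil =>
      simp [PySem.Chars.splitOn.go, consH, spD]
    | cons c rest =>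
      have hstep : PySem.Chars.splitOn.go ['$'] (n+1) (c::rest) cur accs =
          if List.isPrefixOf ['$'] (c::rest) then PySem.Chars.splitOn.go ['$'] n rest [] (cur.reverse :: accs)
          else PySem.Chars.splitOn.go ['$'] n rest (c::cur) accs := by
        simp [PySem.Chars.splitOn.go, List.isPrefixOf]
      rw [hstep]
      have hlen : rest.length < n := by simpa using h
      by_cases hc : c = '$'
      · rw [if_pos (by simp [List.isPrefixOf, hc])]
        rw [ih rest [] (cur.reverse :: accs) hlen]
        simp only [spD, if_pos hc]
        cases hsp : spD rest with
        | nil => exact absurd hsp (spD_ne_nil rest)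
        | cons p ps => simp [consH]
      · rw [if_neg (by simp [List.isPrefixOf]; exact fun hh => hc hh.symm)]
        rw [ih rest (c::cur) accs hlen]
        simp only [spD, if_neg hc]
        cases hsp : spD rest with
        | nil => exact absurd hsp (spD_ne_nil rest)
        | cons p ps => simp [consH]

theorem splitOn_single (cs : List Char) :
    PySem.Chars.splitOn cs ['$'] = spD cs := by
  show PySem.Chars.splitOn.go ['$'] (cs.length + 1) cs [] [] = spD cs
  rw [go_eq_spD (cs.length + 1) cs [] [] (by omega)]
  cases hsp : spD cs with
  | nil => exact absurd hsp (spD_ne_nil cs)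
  | cons p ps => simp [consH]

theorem countGo_eq (fuel : Nat) :
    ∀ (l : List Char) (acc : Nat), l.length ≤ fuel →
      PySem.Chars.count.go ['$'] fuel l acc = acc + l.count '$' := by
  induction fuel with
  | zero =>
    intro l acc h
    have : l = [] := List.length_eq_zero_iff.mp (Nat.le_zero.mp h)
    subst this
    simp [PySem.Chars.count.go]
  | succ n ih =>
    intro l acc h
    cases l with
    | nil => simp [PySem.Chars.count.go]
    | cons c rest =>
      have hstep : PySem.Chars.count.go ['$'] (n+1) (c::rest) acc =
          if List.isPrefixOf ['$'] (c::rest) then PySem.Chars.count.go ['$'] n rest (acc+1)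
          else PySem.Chars.count.go ['$'] n rest acc := by
        simp [PySem.Chars.count.go, List.isPrefixOf]
      rw [hstep]
      have hlen : rest.length ≤ n := by simpa using h
      by_cases hc : c = '$'
      · rw [if_pos (by simp [List.isPrefixOf, hc])]
        rw [ih rest (acc+1) hlen]
        simp [hc]
        omega
      · rw [if_neg (by simp [List.isPrefixOf]; exact fun hh => hc hh.symm)]
        rw [ih rest acc hlen]
        simp [hc]

theorem count_single (cs : List Char) :
    PySem.Chars.count cs ['$'] = cs.count '$' := by
  show (if List.isEmpty ['$'] then cs.length + 1 else PySem.Chars.count.go ['$'] cs.length cs 0) = cs.count '$'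
  rw [if_neg (by simp)]
  rw [countGo_eq cs.length cs 0 (le_refl _)]
  omega

theorem intercalate_spD (cs : List Char) :
    PySem.Chars.join ['$'] (spD cs) = cs := by
  induction cs with
  | nil => simp [spD, PySem.Chars.join_singleton]
  | cons c rest ih =>
    by_cases hc : c = '$'
    · simp only [spD, if_pos hc]
      cases hsp : spD rest with
      | nil => exact absurd hsp (spD_ne_nil rest)
      | cons p ps =>
        rw [hsp] at ih
        rw [PySem.Chars.join_cons_cons]
        simp [ih, hc]
    · simp only [spD, if_neg hc]
      cases hsp : spD rest with
      | nil => exact absurd hsp (spD_ne_nil rest)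
      | cons p ps =>
        rw [hsp] at ih
        cases ps with
        | nil =>
          rw [PySem.Chars.join_singleton] at ih
          rw [PySem.Chars.join_singleton]
          simp [ih]
        | cons q qs =>
          rw [PySem.Chars.join_cons_cons] at ih
          rw [PySem.Chars.join_cons_cons]
          simpa using ih

theorem length_spD (cs : List Char) :
    (spD cs).length = cs.count '$' + 1 := by
  induction cs with
  | nil => simp [spD]
  | cons c rest ih =>
    by_cases hc : c = '$'
    · simp only [spD, if_pos hc]
      simp [hc, ih]
    · simp only [spD, if_neg hc]
      cases hsp : spD rest with
      | nil => exact absurd hsp (spD_ne_nil rest)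
      | cons p ps =>
        rw [hsp] at ih
        simp only [List.length_cons] at ih ⊢
        simp [List.count_cons, ih]
        exact hc

theorem join_nil_eq_flatten (xs : List (List Char)) : PySem.Chars.join [] xs = xs.flatten := by
  induction xs with
  | nil => simp [PySem.Chars.join_nil]
  | cons a l ih =>
    cases l with
    | nil => simp [PySem.Chars.join_singleton]
    | cons b m =>
      rw [PySem.Chars.join_cons_cons]
      simp [ih]

-- A's wrapped join: re-inserts every separator and appends one '$' exactly when the piece count is even (≠ 0)
theorem wrapJoin : ∀ (parts : List (List Char)) (s : Int), s % 2 = 0 →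
    PySem.Chars.join [] ((PySem.List.enumerate parts s).map
      (fun p => if PySem.Int.mod p.1 2 == 0 then p.2 else ['$'] ++ p.2 ++ ['$'])) =
    PySem.Chars.join ['$'] parts ++
      (if parts.length % 2 == 0 && parts.length != 0 then ['$'] else [])
  | [], s, hs => by simp [PySem.List.enumerate_nil, PySem.Chars.join_nil]
  | [p], s, hs => by
    rw [PySem.List.enumerate_cons, PySem.List.enumerate_nil]
    simp only [List.map_cons, List.map_nil]
    rw [PySem.Int.mod_eq_emod_of_pos (by omega : (0:Int) < 2)]
    simp [hs, PySem.Chars.join_singleton]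
  | p :: q :: rest, s, hs => by
    have hs2 : (s+2) % 2 = 0 := by omega
    have ih := wrapJoin rest (s+2) hs2
    rw [join_nil_eq_flatten] at ih ⊢
    rw [PySem.List.enumerate_cons, PySem.List.enumerate_cons]
    simp only [List.map_cons, List.flatten_cons]
    rw [PySem.Int.mod_eq_emod_of_pos (by omega : (0:Int) < 2),
        PySem.Int.mod_eq_emod_of_pos (by omega : (0:Int) < 2)]
    have h1 : (s + 1) % 2 = 1 := by omega
    rw [hs, h1]
    simp only [show ((0:Int) == 0) = true from rfl, show ((1:Int) == 0) = false from rfl,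
      if_true]
    rw [show s + 1 + 1 = s + 2 from by ring, ih]
    rw [PySem.Chars.join_cons_cons]
    cases rest with
    | nil =>
      simp [PySem.Chars.join_singleton]
    | cons r rs =>
      rw [PySem.Chars.join_cons_cons]
      simp only [List.length_cons]
      have hB : ((rs.length + 1 + 1 + 1) % 2 == 0 && (rs.length + 1 + 1 + 1 != 0))
              = ((rs.length + 1) % 2 == 0 && (rs.length + 1 != 0)) := by
        have h3 : (rs.length + 1 + 1 + 1) % 2 = (rs.length + 1) % 2 := by omega
        rw [h3]
        simp
      simp only [hB]
      simp [List.append_assoc]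

-- ===== VERDICT (by name: the statement is the Claim_ definition above) =====
theorem mathMode_spec : Claim_equal_mathMode := by
  intro value _
  show mathMode value = mathMode_alt value
  simp only [mathMode, mathMode_alt]
  rw [splitOn_single, wrapJoin (spD value.toList) 0 (by decide), intercalate_spD, length_spD]
  have hcnt : PySem.Str.count value "$" = value.toList.count '$' := by
    rw [PySem.Str.count_eq]
    have hd : ("$" : String).toList = ['$'] := by decide
    rw [hd, count_single]
  rw [hcnt]
  by_cases h : value.toList.count '$' % 2 = 1
  · have h2 : (value.toList.count '$' + 1) % 2 = 0 := by omega
    rw [if_pos (by simp [h2]), if_pos (by simp [h])]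
    have hof := (String.ofList_toList : String.ofList (String.toList (value ++ "$")) = value ++ "$")
    rw [← hof, String.toList_append]
    have hd : ("$" : String).toList = ['$'] := by decide
    rw [hd]
  · have h1 : value.toList.count '$' % 2 = 0 := by omega
    have h2 : (value.toList.count '$' + 1) % 2 = 1 := by omega
    rw [if_neg (by simp [h2]), if_neg (by simp [h])]
    simp [String.ofList_toList]
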